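-- pv_equiv track=rewrite | github.com/HandelSim/harness | proxy/proxy.py | _scan_balanced_json
-- ===== SOURCE A (Python) =====
-- def _scan_balanced_json(text, start):
--     """Scan from `start` for a complete JSON object, tracking string
--     boundaries and brace depth. Returns (json_str, position_after_json)
--     or (None, start) if no complete object found.
--
--     String content (between unescaped double quotes) is opaque — braces
--     and backticks inside strings do NOT count as structural. Backslash
--     escapes within strings are honored. This lets the scanner walk past
--     LLM-emitted tool-call arguments whose strings contain markdown code
--     fences or embedded JSON examples.
--     """
--     if start >= len(text) or text[start] != '{':
--         return None, start
--
--     depth = 0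
--     in_string = False
--     escape_next = False
--
--     for i in range(start, len(text)):
--         ch = text[i]
--
--         if escape_next:
--             escape_next = False
--             continue
--
--         if in_string:
--             if ch == '\\':
--                 escape_next = True
--             elif ch == '"':
--                 in_string = False
--             continue
--
--         if ch == '"':
--             in_string = True
--             continue
--         if ch == '{':
--             depth += 1
--         elif ch == '}':
--             depth -= 1
--             if depth == 0:
--                 return text[start:i + 1], i + 1
--
--     return None, start
-- ===== SOURCE B (Python) =====
-- def _scan_balanced_json(text, start):
--     """Recursive descent: a complete JSON object is '{', then a sequence of
--     nested objects / string literals / other characters, then the matching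
--     '}'. _skip_object consumes one object (recursing on nested '{'),
--     _skip_string consumes a string literal; no depth counter or
--     in_string/escape flags are kept."""
--     if start >= len(text) or text[start] != '{':
--         return None, start
--     end = _skip_object(text, start)
--     if end is None:
--         return None, start
--     return text[start:end], end
--
--
-- def _skip_object(text, i):
--     # text[i] == '{'; return the index just past the matching '}' or None.
--     n = len(text)
--     i += 1
--     while i < n:
--         ch = text[i]
--         if ch == '}':
--             return i + 1
--         if ch == '{':
--             i = _skip_object(text, i)
--             if i is None:
--                 return None
--         elif ch == '"':
--             i = _skip_string(text, i)
--         else: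
--             i += 1
--     return None
--
--
-- def _skip_string(text, i):
--     # text[i] == '"'; return the index just past the closing quote
--     # (or an index >= len(text) if the string never closes).
--     n = len(text)
--     i += 1
--     while i < n:
--         ch = text[i]
--         if ch == '\\':
--             i += 2
--         elif ch == '"':
--             return i + 1
--         else:
--             i += 1
--     return i
-- ===== Notes on version B (the rewrite author's own statement) =====
-- stated objective: alternative
-- what changed: Replaces A's flat single-pass state machine (depth counter plus in_string/escape_next flags) by recursive descent: _skip_object consumes one balanced object, recursing on each nested '{', and _skip_string consumes a whole string literal, so no depth counter or string/escape flags exist.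
import Mathlib
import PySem

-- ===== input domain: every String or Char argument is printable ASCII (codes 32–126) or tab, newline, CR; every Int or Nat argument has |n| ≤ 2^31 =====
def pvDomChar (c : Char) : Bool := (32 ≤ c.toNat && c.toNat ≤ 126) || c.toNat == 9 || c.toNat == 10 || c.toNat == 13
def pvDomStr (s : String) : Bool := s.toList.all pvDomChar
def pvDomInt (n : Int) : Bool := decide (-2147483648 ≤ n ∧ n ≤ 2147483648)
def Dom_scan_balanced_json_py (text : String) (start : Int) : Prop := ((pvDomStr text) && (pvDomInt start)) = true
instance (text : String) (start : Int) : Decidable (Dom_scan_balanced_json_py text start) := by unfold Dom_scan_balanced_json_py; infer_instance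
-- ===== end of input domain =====

-- B replaces A's flat state machine (depth counter + in_string/escape_next flags) by
-- recursive descent: _skip_object consumes one balanced object (recursing on nested '{'),
-- _skip_string consumes a string literal (objective: alternative; same cost).
-- Loops/recursion are ported with a fuel counter (fuel ≥ remaining indices at every call;
-- the fuel-0 branch returns the same value as normal loop exit / failure).

-- ===== PORT A =====
-- the for-loop over range(start, len(text)) with state (depth, in_string, escape_next)
def scanA_loop (text : String) (start n : Int) (fuel : Nat) (i depth : Int)
    (in_string escape_next : Bool) : Option String × Int :=
  match fuel with
  | 0 => (none, start)
  | fuel + 1 =>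
    if i < n then
      if escape_next then
        scanA_loop text start n fuel (i + 1) depth in_string false
      else if in_string then
        if (PySem.Str.pyGet? text i).getD ' ' = '\\' then
          scanA_loop text start n fuel (i + 1) depth in_string true
        else if (PySem.Str.pyGet? text i).getD ' ' = '"' then
          scanA_loop text start n fuel (i + 1) depth false escape_next
        else scanA_loop text start n fuel (i + 1) depth in_string escape_next
      else if (PySem.Str.pyGet? text i).getD ' ' = '"' then
        scanA_loop text start n fuel (i + 1) depth true escape_next
      else if (PySem.Str.pyGet? text i).getD ' ' = '{' then
        scanA_loop text start n fuel (i + 1) (depth + 1) in_string escape_next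
      else if (PySem.Str.pyGet? text i).getD ' ' = '}' then
        if depth - 1 = 0 then (some (PySem.Str.slice text (some start) (some (i + 1))), i + 1)
        else scanA_loop text start n fuel (i + 1) (depth - 1) in_string escape_next
      else scanA_loop text start n fuel (i + 1) depth in_string escape_next
    else (none, start)

def scan_balanced_json_py (text : String) (start : Int) : Option String × Int :=
  if start ≥ PySem.Str.len text then (none, start)
  else
    match PySem.Str.pyGet? text start with
    | none => (none, start)  -- Python raises IndexError here; excluded by Pre_
    | some c =>
      if c ≠ '{' then (none, start)
      else
        scanA_loop text start (PySem.Str.len text)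
          (PySem.Str.len text - start).toNat start 0 false false

-- ===== PORT B =====
-- _skip_string's while-loop, entered at i = (index of the opening quote) + 1:
-- on '\' jump by 2, after the closing '"' return, otherwise step by 1
def bStrLoop (text : String) (n : Int) (fuel : Nat) (i : Int) : Int :=
  match fuel with
  | 0 => i
  | fuel + 1 =>
    if i < n then
      if (PySem.Str.pyGet? text i).getD ' ' = '\\' then bStrLoop text n fuel (i + 2)
      else if (PySem.Str.pyGet? text i).getD ' ' = '"' then i + 1
      else bStrLoop text n fuel (i + 1)
    else i

-- _skip_object's while-loop, entered at i = (index of the opening brace) + 1;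
-- the nested '{' case is Python's recursive call _skip_object(text, i), i.e. this
-- loop re-entered at i+1, then the loop continues at the returned index
def bObjLoop (text : String) (n : Int) (fuel : Nat) (i : Int) : Option Int :=
  match fuel with
  | 0 => none
  | fuel + 1 =>
    if i < n then
      if (PySem.Str.pyGet? text i).getD ' ' = '}' then some (i + 1)
      else if (PySem.Str.pyGet? text i).getD ' ' = '{' then
        match bObjLoop text n fuel (i + 1) with
        | none => none
        | some j => bObjLoop text n fuel j
      else if (PySem.Str.pyGet? text i).getD ' ' = '"' then
        bObjLoop text n fuel (bStrLoop text n fuel (i + 1))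
      else bObjLoop text n fuel (i + 1)
    else none

def scan_balanced_json_py_alt (text : String) (start : Int) : Option String × Int :=
  if start ≥ PySem.Str.len text then (none, start)
  else
    match PySem.Str.pyGet? text start with
    | none => (none, start)  -- Python raises IndexError here; excluded by Pre_
    | some c =>
      if c ≠ '{' then (none, start)
      else
        match bObjLoop text (PySem.Str.len text)
            (PySem.Str.len text - start).toNat (start + 1) with
        | none => (none, start)
        | some j => (some (PySem.Str.slice text (some start) (some j)), j)

-- ===== PRECONDITION & SPEC =====
-- Pre_ excludes exactly the inputs where the Pythons raise IndexError
-- (negative start with start < -len(text)); both return normally everywhere else.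
def Pre_scan_balanced_json_py (text : String) (start : Int) : Prop :=
  -(PySem.Str.len text) ≤ start
instance (text : String) (start : Int) : Decidable (Pre_scan_balanced_json_py text start) := by
  unfold Pre_scan_balanced_json_py; infer_instance

def pvWitness_scan_balanced_json_py : String × Int := ("{\"a\": 1}", 0)

def Spec_scan_balanced_json_py (text : String) (start : Int) (out : Option String × Int) : Prop := out = scan_balanced_json_py_alt text start
instance (text : String) (start : Int) (out : Option String × Int) : Decidable (Spec_scan_balanced_json_py text start out) := by unfold Spec_scan_balanced_json_py; infer_instance

-- ===== CLAIM (what is proved, stated in full; the proofs are below) =====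
def Claim_equal_scan_balanced_json_py : Prop := ∀ (text : String) (start : Int), Dom_scan_balanced_json_py text start → Pre_scan_balanced_json_py text start → Spec_scan_balanced_json_py text start (scan_balanced_json_py text start)

-- ===== LEMMAS AND PROOFS =====

-- proof-only intermediate: A's loop restricted to non-string mode, with string
-- literals consumed by bStrLoop (a flat depth-counter loop bridging A to B)
def scanM_loop (text : String) (start n : Int) (fuel : Nat) (i depth : Int) :
    Option String × Int :=
  match fuel with
  | 0 => (none, start)
  | fuel + 1 =>
    if i < n then
      if (PySem.Str.pyGet? text i).getD ' ' = '"' then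
        scanM_loop text start n fuel (bStrLoop text n fuel (i + 1)) depth
      else if (PySem.Str.pyGet? text i).getD ' ' = '{' then
        scanM_loop text start n fuel (i + 1) (depth + 1)
      else if (PySem.Str.pyGet? text i).getD ' ' = '}' then
        if depth - 1 = 0 then (some (PySem.Str.slice text (some start) (some (i + 1))), i + 1)
        else scanM_loop text start n fuel (i + 1) (depth - 1)
      else scanM_loop text start n fuel (i + 1) depth
    else (none, start)

-- past the end, A's loop yields (none, start) whatever the fuel
theorem scanA_exit (text : String) (start n : Int) (f : Nat) (i depth : Int)
    (s e : Bool) (h : ¬ i < n) :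
    scanA_loop text start n f i depth s e = (none, start) := by
  cases f with
  | zero => rfl
  | succ f => rw [scanA_loop, if_neg h]

theorem scanM_exit (text : String) (start n : Int) (f : Nat) (i depth : Int) (h : ¬ i < n) :
    scanM_loop text start n f i depth = (none, start) := by
  cases f with
  | zero => rfl
  | succ f => rw [scanM_loop, if_neg h]

theorem bStr_exit (text : String) (n : Int) (f : Nat) (i : Int) (h : ¬ i < n) :
    bStrLoop text n f i = i := by
  cases f with
  | zero => rfl
  | succ f => rw [bStrLoop, if_neg h]

theorem bObj_exit (text : String) (n : Int) (f : Nat) (i : Int) (h : ¬ i < n) :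
    bObjLoop text n f i = none := by
  cases f with
  | zero => rfl
  | succ f => rw [bObjLoop, if_neg h]

-- the inner string scan never moves the index backwards
theorem bStr_ge (text : String) (n : Int) (f : Nat) (i : Int) :
    i ≤ bStrLoop text n f i := by
  induction f generalizing i with
  | zero => exact le_refl i
  | succ f ih =>
    rw [bStrLoop]
    split_ifs
    · have := ih (i + 2); omega
    · omega
    · have := ih (i + 1); omega
    · omega

-- fuel irrelevance for the string scan
theorem bStr_fuel (text : String) (n : Int) (f g : Nat) (i : Int)
    (hf : (n - i).toNat ≤ f) (hg : (n - i).toNat ≤ g) :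
    bStrLoop text n f i = bStrLoop text n g i := by
  induction f generalizing g i with
  | zero =>
    have h : ¬ i < n := by omega
    rw [bStr_exit text n 0 i h, bStr_exit text n g i h]
  | succ f ih =>
    by_cases h : i < n
    · cases g with
      | zero => omega
      | succ g =>
        rw [bStrLoop, bStrLoop, if_pos h, if_pos h]
        split_ifs
        · exact ih g (i + 2) (by omega) (by omega)
        · rfl
        · exact ih g (i + 1) (by omega) (by omega)
    · rw [bStr_exit text n _ i h, bStr_exit text n g i h]

-- a successful object skip strictly advances the index and stays within the text
theorem bObj_bounds (text : String) (n : Int) (f : Nat) (i j : Int)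
    (h : bObjLoop text n f i = some j) : i < j ∧ j ≤ n := by
  induction f generalizing i j with
  | zero => simp [bObjLoop] at h
  | succ f ih =>
    rw [bObjLoop] at h
    by_cases hin : i < n
    · rw [if_pos hin] at h
      split_ifs at h with h1 h2 h3
      · cases h; omega
      · cases hb : bObjLoop text n f (i + 1) with
        | none => rw [hb] at h; simp at h
        | some j1 =>
          rw [hb] at h
          have b1 := ih (i + 1) j1 hb
          have b2 := ih j1 j h
          omega
      · have hge := bStr_ge text n f (i + 1)
        have := ih _ j h
        omega
      · have := ih (i + 1) j h
        omega
    · rw [if_neg hin] at h; simp at h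

-- fuel irrelevance for the object skip
theorem bObj_fuel (text : String) (n : Int) (f g : Nat) (i : Int)
    (hf : (n - i).toNat ≤ f) (hg : (n - i).toNat ≤ g) :
    bObjLoop text n f i = bObjLoop text n g i := by
  induction f generalizing g i with
  | zero =>
    have h : ¬ i < n := by omega
    rw [bObj_exit text n 0 i h, bObj_exit text n g i h]
  | succ f ih =>
    by_cases h : i < n
    · cases g with
      | zero => omega
      | succ g =>
        rw [bObjLoop, bObjLoop, if_pos h, if_pos h]
        split_ifs with h1 h2 h3
        · rfl
        · rw [ih g (i + 1) (by omega) (by omega)]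
          cases hb : bObjLoop text n g (i + 1) with
          | none => rfl
          | some j =>
            have := bObj_bounds text n g (i + 1) j hb
            exact ih g j (by omega) (by omega)
        · rw [bStr_fuel text n f g (i + 1) (by omega) (by omega)]
          have := bStr_ge text n g (i + 1)
          exact ih g _ (by omega) (by omega)
        · exact ih g (i + 1) (by omega) (by omega)
    · rw [bObj_exit text n _ i h, bObj_exit text n g i h]

-- fuel irrelevance for the bridging loop
theorem scanM_fuel (text : String) (start n : Int) (f g : Nat) (i depth : Int)
    (hf : (n - i).toNat ≤ f) (hg : (n - i).toNat ≤ g) :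
    scanM_loop text start n f i depth = scanM_loop text start n g i depth := by
  induction f generalizing g i depth with
  | zero =>
    have h : ¬ i < n := by omega
    rw [scanM_exit text start n 0 i depth h, scanM_exit text start n g i depth h]
  | succ f ih =>
    by_cases h : i < n
    · cases g with
      | zero => omega
      | succ g =>
        rw [scanM_loop, scanM_loop, if_pos h, if_pos h]
        split_ifs with h1 h2 h3
        · rw [bStr_fuel text n f g (i + 1) (by omega) (by omega)]
          have := bStr_ge text n g (i + 1)
          exact ih g _ depth (by omega) (by omega)
        · exact ih g (i + 1) (depth + 1) (by omega) (by omega)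
        · rfl
        · exact ih g (i + 1) (depth - 1) (by omega) (by omega)
        · exact ih g (i + 1) depth (by omega) (by omega)
    · rw [scanM_exit text start n _ i depth h, scanM_exit text start n g i depth h]

-- fuel irrelevance for A's loop
theorem scanA_fuel (text : String) (start n : Int) (f g : Nat) (i depth : Int) (s e : Bool)
    (hf : (n - i).toNat ≤ f) (hg : (n - i).toNat ≤ g) :
    scanA_loop text start n f i depth s e = scanA_loop text start n g i depth s e := by
  revert hf hg
  induction f generalizing g i depth s e with
  | zero =>
    intro hf hg
    have h : ¬ i < n := by omega
    rw [scanA_exit text start n 0 i depth s e h, scanA_exit text start n g i depth s e h]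
  | succ f ih =>
    intro hf hg
    by_cases h : i < n
    · cases g with
      | zero => omega
      | succ g =>
        rw [scanA_loop, scanA_loop, if_pos h, if_pos h]
        split_ifs <;> first
          | rfl
          | exact ih g (i + 1) _ _ _ (by omega) (by omega)
    · rw [scanA_exit text start n _ i depth s e h, scanA_exit text start n g i depth s e h]

-- an escape-pending state just consumes one character
theorem scanA_escape (text : String) (start n : Int) (f : Nat) (i depth : Int) (b : Bool)
    (hf : (n - i).toNat ≤ f) :
    scanA_loop text start n f i depth b true =
    scanA_loop text start n f (i + 1) depth b false := by
  cases f with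
  | zero =>
    have h : ¬ i + 1 < n := by omega
    rw [scanA_exit text start n 0 (i + 1) depth b false h]; rfl
  | succ f =>
    by_cases h : i < n
    · rw [scanA_loop, if_pos h, if_pos rfl]
      exact scanA_fuel text start n f (f + 1) (i + 1) depth b false (by omega) (by omega)
    · rw [scanA_exit text start n _ i depth b true h,
        scanA_exit text start n _ (i + 1) depth b false (by omega)]

-- A's in-string scan from index i lands at bStrLoop's exit index, out of string mode
theorem scanA_string (text : String) (start n : Int) (f : Nat) (i depth : Int)
    (hf : (n - i).toNat ≤ f) :
    scanA_loop text start n f i depth true false =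
    scanA_loop text start n f (bStrLoop text n f i) depth false false := by
  revert hf
  induction f generalizing i with
  | zero =>
    intro hf
    have h : ¬ i < n := by omega
    rw [scanA_exit text start n 0 i depth true false h]; rfl
  | succ f ih =>
    intro hf
    by_cases h : i < n
    · rw [scanA_loop, if_pos h, bStrLoop, if_pos h]
      simp only [Bool.false_eq_true, if_false, if_true]
      by_cases hb : (PySem.Str.pyGet? text i).getD ' ' = '\\'
      · rw [if_pos hb, if_pos hb,
          scanA_escape text start n f (i + 1) depth true (by omega),
          show i + 1 + 1 = i + 2 from by ring,
          ih (i + 2) (by omega)]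
        have hj := bStr_ge text n f (i + 2)
        exact scanA_fuel text start n f (f + 1) _ depth false false (by omega) (by omega)
      · rw [if_neg hb, if_neg hb]
        by_cases hq : (PySem.Str.pyGet? text i).getD ' ' = '"'
        · rw [if_pos hq, if_pos hq]
          exact scanA_fuel text start n f (f + 1) (i + 1) depth false false (by omega) (by omega)
        · rw [if_neg hq, if_neg hq, ih (i + 1) (by omega)]
          have hj := bStr_ge text n f (i + 1)
          exact scanA_fuel text start n f (f + 1) _ depth false false (by omega) (by omega)
    · rw [scanA_exit text start n _ i depth true false h, bStrLoop, if_neg h,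
        scanA_exit text start n _ i depth false false h]

-- A's loop out of string mode is the bridging depth-counter loop
theorem scanA_eq_scanM (text : String) (start n : Int) (f : Nat) (i depth : Int)
    (hf : (n - i).toNat ≤ f) :
    scanA_loop text start n f i depth false false = scanM_loop text start n f i depth := by
  revert hf
  induction f generalizing i depth with
  | zero => intro _; rfl
  | succ f ih =>
    intro hf
    by_cases h : i < n
    · rw [scanA_loop, if_pos h, scanM_loop, if_pos h]
      simp only [Bool.false_eq_true, if_false]
      by_cases hq : (PySem.Str.pyGet? text i).getD ' ' = '"'
      · rw [if_pos hq, if_pos hq,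
          scanA_string text start n f (i + 1) depth (by omega)]
        have hj := bStr_ge text n f (i + 1)
        exact ih _ depth (by omega)
      · rw [if_neg hq, if_neg hq]
        by_cases ho : (PySem.Str.pyGet? text i).getD ' ' = '{'
        · rw [if_pos ho, if_pos ho]
          exact ih (i + 1) (depth + 1) (by omega)
        · rw [if_neg ho, if_neg ho]
          by_cases hc : (PySem.Str.pyGet? text i).getD ' ' = '}'
          · rw [if_pos hc, if_pos hc]
            by_cases hd : depth - 1 = 0
            · rw [if_pos hd, if_pos hd]
            · rw [if_neg hd, if_neg hd]
              exact ih (i + 1) (depth - 1) (by omega)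
          · rw [if_neg hc, if_neg hc]
            exact ih (i + 1) depth (by omega)
    · rw [scanA_exit text start n _ i depth false false h, scanM_loop, if_neg h]

-- the bridging depth-counter loop at depth d ≥ 1 is d pending recursive object skips
theorem scanM_eq_bObj (text : String) (start n : Int) (f : Nat) (i depth : Int)
    (hd : 1 ≤ depth) (hf : (n - i).toNat ≤ f) :
    scanM_loop text start n f i depth =
      match bObjLoop text n f i with
      | none => (none, start)
      | some j =>
        if depth = 1 then (some (PySem.Str.slice text (some start) (some j)), j)
        else scanM_loop text start n f j (depth - 1) := by
  induction f generalizing i depth with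
  | zero =>
    have h : ¬ i < n := by omega
    rw [scanM_exit text start n 0 i depth h, bObj_exit text n 0 i h]
  | succ f ih =>
    by_cases h : i < n
    · rw [scanM_loop, if_pos h, bObjLoop, if_pos h]
      by_cases hc : (PySem.Str.pyGet? text i).getD ' ' = '}'
      · by_cases hq : (PySem.Str.pyGet? text i).getD ' ' = '"'
        · rw [hc] at hq; exact absurd hq (by decide)
        · by_cases ho : (PySem.Str.pyGet? text i).getD ' ' = '{'
          · rw [hc] at ho; exact absurd ho (by decide)
          · rw [if_neg hq, if_neg ho, if_pos hc, if_pos hc]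
            dsimp only
            by_cases hd1 : depth = 1
            · rw [if_pos (show depth - 1 = 0 by omega), if_pos hd1]
            · rw [if_neg (show ¬ depth - 1 = 0 by omega), if_neg hd1]
              exact scanM_fuel text start n f (f + 1) (i + 1) (depth - 1) (by omega) (by omega)
      · by_cases hq : (PySem.Str.pyGet? text i).getD ' ' = '"'
        · by_cases ho : (PySem.Str.pyGet? text i).getD ' ' = '{'
          · rw [hq] at ho; exact absurd ho (by decide)
          · rw [if_pos hq, if_neg ho, if_neg hc, if_pos hq]
            have hge := bStr_ge text n f (i + 1)
            rw [ih _ depth hd (by omega)]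
            cases hb : bObjLoop text n f (bStrLoop text n f (i + 1)) with
            | none => rfl
            | some j =>
              dsimp only
              have := bObj_bounds text n f _ j hb
              by_cases hd1 : depth = 1
              · rw [if_pos hd1, if_pos hd1]
              · rw [if_neg hd1, if_neg hd1]
                exact scanM_fuel text start n f (f + 1) j (depth - 1) (by omega) (by omega)
        · by_cases ho : (PySem.Str.pyGet? text i).getD ' ' = '{'
          · rw [if_neg hq, if_pos ho, if_neg hc, if_pos ho]
            rw [ih (i + 1) (depth + 1) (by omega) (by omega)]
            cases hb : bObjLoop text n f (i + 1) with
            | none => rfl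
            | some j =>
              dsimp only
              have hbd := bObj_bounds text n f (i + 1) j hb
              rw [if_neg (show ¬ depth + 1 = 1 by omega)]
              rw [show depth + 1 - 1 = depth from by ring]
              rw [ih j depth hd (by omega)]
              cases hb2 : bObjLoop text n f j with
              | none => rfl
              | some j2 =>
                dsimp only
                have := bObj_bounds text n f j j2 hb2
                by_cases hd1 : depth = 1
                · rw [if_pos hd1, if_pos hd1]
                · rw [if_neg hd1, if_neg hd1]
                  exact scanM_fuel text start n f (f + 1) j2 (depth - 1) (by omega) (by omega)
          · rw [if_neg hq, if_neg ho, if_neg hc, if_neg hq, if_neg ho, if_neg hc]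
            rw [ih (i + 1) depth hd (by omega)]
            cases hb : bObjLoop text n f (i + 1) with
            | none => rfl
            | some j =>
              dsimp only
              have := bObj_bounds text n f (i + 1) j hb
              by_cases hd1 : depth = 1
              · rw [if_pos hd1, if_pos hd1]
              · rw [if_neg hd1, if_neg hd1]
                exact scanM_fuel text start n f (f + 1) j (depth - 1) (by omega) (by omega)
    · rw [scanM_exit text start n _ i depth h, bObj_exit text n _ i h]

-- ===== VERDICT (by name: the statement is the Claim_ definition above) =====
theorem scan_balanced_json_py_spec : Claim_equal_scan_balanced_json_py := by
  intro text start _ _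
  unfold Spec_scan_balanced_json_py scan_balanced_json_py scan_balanced_json_py_alt
  split
  · rfl
  · rename_i hlt
    cases h : PySem.Str.pyGet? text start with
    | none => rfl
    | some c =>
      simp only []
      split
      · rfl
      · rename_i hc
        have hc' : c = '{' := by by_contra hne; exact hc hne
        have hstart : start < PySem.Str.len text := by omega
        set n := PySem.Str.len text with hn
        have hfuel : 1 ≤ (n - start).toNat := by omega
        obtain ⟨f, hf⟩ : ∃ f, (n - start).toNat = f + 1 :=
          ⟨(n - start).toNat - 1, by omega⟩
        rw [scanA_eq_scanM text start n _ start 0 (le_refl _), hf]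
        rw [scanM_loop, if_pos hstart]
        have hch : (PySem.Str.pyGet? text start).getD ' ' = '{' := by rw [h, hc']; rfl
        rw [if_neg (by rw [hch]; decide), if_pos hch]
        rw [show (0:Int) + 1 = 1 from rfl,
          scanM_eq_bObj text start n f (start + 1) 1 (le_refl 1) (by omega)]
        rw [bObj_fuel text n f (f + 1) (start + 1) (by omega) (by omega), ← hf]
        cases hb : bObjLoop text n (n - start).toNat (start + 1) with
        | none => rfl
        | some j => dsimp only; rw [if_pos rfl]
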